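-- pv_equiv track=rewrite | github.com/mattclarke/advent_of_code_15 | day_19/day_19.py | break_down_formula
-- ===== SOURCE A (Python) =====
-- def break_down_formula(formula):
--     result = []
--     while formula:
--         elem = formula[0:2] if len(formula) >= 2 and formula[1].islower() else \
--         formula[0]
--         result.append(elem)
--         formula = formula[len(elem):]
--     return result
-- ===== SOURCE B (Python) =====
-- def break_down_formula(formula):
--     result = []
--     for ch in formula:
--         if result and 'a' <= ch <= 'z' and len(result[-1]) == 1:
--             result[-1] += ch
--         else:
--             result.append(ch)
--     return result
-- ===== Notes on version B (the rewrite author's own statement) =====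
-- stated objective: faster
-- what changed: Replaced the while-loop that repeatedly reslices the remaining string (O(n) copy per emitted token) by a single forward for-loop over the characters that appends each character as a new token unless it is a lowercase letter following a one-character token, in which case it is attached to that token.
import Mathlib
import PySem

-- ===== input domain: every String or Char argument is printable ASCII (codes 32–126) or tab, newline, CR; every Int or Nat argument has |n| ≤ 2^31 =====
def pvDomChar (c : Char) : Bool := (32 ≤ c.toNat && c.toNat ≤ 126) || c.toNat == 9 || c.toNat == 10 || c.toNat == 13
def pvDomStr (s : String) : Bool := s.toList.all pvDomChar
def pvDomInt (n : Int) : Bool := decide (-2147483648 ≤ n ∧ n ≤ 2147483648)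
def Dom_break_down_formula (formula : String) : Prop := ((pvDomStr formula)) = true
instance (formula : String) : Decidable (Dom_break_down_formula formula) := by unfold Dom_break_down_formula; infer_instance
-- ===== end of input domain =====

-- B replaces A's while-loop over ever-shorter string slices by a single forward fold over the
-- characters that attaches a lowercase character to the previous one-character token (simpler, no reslicing).

-- ===== PORT A =====
-- A's while loop (shrink `formula` by the token just emitted) becomes the obvious structural
-- recursion over the character list; `formula[1].islower()` is PySem.Chars.islower (exact on ASCII).
def breakDownGo : List Char → List String
  | [] => []
  | a :: rest =>
    match rest with
    | b :: rest' =>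
      if PySem.Chars.islower b then
        String.ofList [a, b] :: breakDownGo rest'
      else
        String.ofList [a] :: breakDownGo (b :: rest')
    | [] => [String.ofList [a]]

def break_down_formula (formula : String) : List String :=
  breakDownGo formula.toList

-- ===== PORT B =====
-- one step of B's for-loop: `if result and 'a' <= ch <= 'z' and len(result[-1]) == 1:
--   result[-1] += ch  else: result.append(ch)`
def breakDownStep (acc : List String) (c : Char) : List String :=
  if acc ≠ [] ∧ ('a' ≤ c ∧ c ≤ 'z') ∧ (acc.getLastD "").length = 1 then
    acc.dropLast ++ [(acc.getLastD "").push c]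
  else
    acc ++ [String.ofList [c]]

def break_down_formula_alt (formula : String) : List String :=
  formula.toList.foldl breakDownStep []

-- ===== PRECONDITION & SPEC =====
def Spec_break_down_formula (formula : String) (out : List String) : Prop := out = break_down_formula_alt formula
instance (formula : String) (out : List String) : Decidable (Spec_break_down_formula formula out) := by unfold Spec_break_down_formula; infer_instance

-- ===== CLAIM (what is proved, stated in full; the proofs are below) =====
def Claim_equal_break_down_formula : Prop := ∀ (formula : String), Dom_break_down_formula formula → Spec_break_down_formula formula (break_down_formula formula)

-- ===== LEMMAS AND PROOFS =====

-- a step whose attach-condition fails just appends a fresh one-character token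
theorem breakDownStep_fresh (acc : List String) (c : Char)
    (h : ¬(acc ≠ [] ∧ ('a' ≤ c ∧ c ≤ 'z') ∧ (acc.getLastD "").length = 1)) :
    breakDownStep acc c = acc ++ [String.ofList [c]] := by
  simp only [breakDownStep, if_neg h]

-- main invariant: if the first character of `cs` cannot attach to `acc`'s last token,
-- B's fold from `acc` just appends A's tokenisation of `cs`
theorem foldl_breakDownStep_eq (n : Nat) : ∀ (cs : List Char) (acc : List String),
    cs.length ≤ n →
    (∀ c cs', cs = c :: cs' → breakDownStep acc c = acc ++ [String.ofList [c]]) →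
    List.foldl breakDownStep acc cs = acc ++ breakDownGo cs := by
  induction n with
  | zero =>
    intro cs acc hlen _
    have : cs = [] := by cases cs <;> simp_all
    subst this; simp [breakDownGo]
  | succ n ih =>
    intro cs acc hlen hhead
    match cs with
    | [] => simp [breakDownGo]
    | a :: rest =>
      rw [List.foldl_cons, hhead a rest rfl]
      match rest with
      | [] => simp [breakDownGo]
      | b :: rest' =>
        by_cases hb : PySem.Chars.islower b = true
        · have hbr : 'a' ≤ b ∧ b ≤ 'z' := by
            simpa [PySem.Chars.islower] using hb
          have hstep : breakDownStep (acc ++ [String.ofList [a]]) b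
              = acc ++ [String.ofList [a, b]] := by
            have hcond : (acc ++ [String.ofList [a]]) ≠ [] ∧ ('a' ≤ b ∧ b ≤ 'z') ∧
                ((acc ++ [String.ofList [a]]).getLastD "").length = 1 := by
              refine ⟨by simp, hbr, ?_⟩
              simp
            have hpush : (String.ofList [a]).push b = String.ofList [a, b] := by
              apply String.toList_injective; simp
            simp only [breakDownStep, if_pos hcond]
            simp [hpush]
          rw [List.foldl_cons, hstep,
            ih rest' (acc ++ [String.ofList [a, b]])
              (by simp at hlen ⊢; omega)
              (by
                intro c cs' hc
                apply breakDownStep_fresh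
                simp)]
          simp [breakDownGo, hb]
        · have hnb : ¬('a' ≤ b ∧ b ≤ 'z') := by
            simpa [PySem.Chars.islower] using hb
          have hstep : breakDownStep (acc ++ [String.ofList [a]]) b
              = (acc ++ [String.ofList [a]]) ++ [String.ofList [b]] := by
            apply breakDownStep_fresh
            intro h; exact hnb h.2.1
          rw [ih (b :: rest') (acc ++ [String.ofList [a]])
              (by simp at hlen ⊢; omega)
              (by
                intro c cs' hc
                cases hc
                exact hstep)]
          simp [breakDownGo, hb]

-- ===== VERDICT (by name: the statement is the Claim_ definition above) =====
theorem break_down_formula_spec : Claim_equal_break_down_formula := by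
  intro formula _
  unfold Spec_break_down_formula break_down_formula break_down_formula_alt
  rw [foldl_breakDownStep_eq formula.toList.length formula.toList [] le_rfl
    (by intro c cs' hc; apply breakDownStep_fresh; simp)]
  simp
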